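-- pv_equiv track=rewrite | github.com/kumashreeya/agents-pipeline | agents/test_agent.py | _remove_function_redefinition
-- ===== SOURCE A (Python) =====
-- def _remove_function_redefinition(test_code, function_name):
--     """Remove if the AI redefined the function being tested."""
--     lines = test_code.split('\n')
--     clean = []
--     skip = False
--
--     for line in lines:
--         if line.strip().startswith(f'def {function_name}(') and 'def test_' not in line:
--             skip = True
--             continue
--         if skip:
--             if line.strip() and not line.startswith(' ') and not line.startswith('\t'):
--                 skip = False
--             else:
--                 continue
--         if not skip:
--             clean.append(line)
--
--     return '\n'.join(clean)
-- ===== SOURCE B (Python) =====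
-- def _remove_function_redefinition(test_code, function_name):
--     """Remove if the AI redefined the function being tested."""
--     lines = test_code.split('\n')
--     header = f'def {function_name}('
--     clean = []
--     i = 0
--     n = len(lines)
--     while i < n:
--         line = lines[i]
--         if line.strip().startswith(header) and 'def test_' not in line:
--             # drop the def line, then consume the indented/blank block;
--             # stop at (and re-examine) the first column-0 non-blank line
--             j = i + 1
--             while j < n and (not lines[j].strip()
--                              or lines[j].startswith(' ')
--                              or lines[j].startswith('\t')):
--                 j += 1
--             i = j
--         else:
--             clean.append(line)
--             i += 1
--     return '\n'.join(clean)
-- ===== Notes on version B (the rewrite author's own statement) =====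
-- stated objective: alternative
-- what changed: Replaces A's flat boolean skip-flag state machine with an index-based scan whose inner loop consumes each removed block explicitly and stops at (without dropping) the first column-0 non-blank line, which the outer loop then re-examines.
import Mathlib
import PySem

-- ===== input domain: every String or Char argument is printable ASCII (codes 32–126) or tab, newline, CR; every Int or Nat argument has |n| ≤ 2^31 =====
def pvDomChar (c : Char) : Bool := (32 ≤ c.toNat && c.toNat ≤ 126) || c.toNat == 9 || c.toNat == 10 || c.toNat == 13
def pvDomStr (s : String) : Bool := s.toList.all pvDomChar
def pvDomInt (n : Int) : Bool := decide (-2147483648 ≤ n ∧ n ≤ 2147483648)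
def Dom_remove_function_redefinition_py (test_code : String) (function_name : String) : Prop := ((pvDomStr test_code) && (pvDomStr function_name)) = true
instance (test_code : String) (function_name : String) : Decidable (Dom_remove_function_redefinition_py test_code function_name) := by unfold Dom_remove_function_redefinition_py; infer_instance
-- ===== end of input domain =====

-- B replaces A's boolean skip-flag state machine by an index scan that consumes each
-- removed block with an explicit inner loop (objective: alternative decomposition; same cost).

-- shared line predicates (identical expressions in both Python sources)
-- line.strip().startswith(f'def {function_name}(') and 'def test_' not in line
def pvIsDef (fn line : String) : Bool :=
  PySem.Str.startswith (PySem.Str.strip line) (PySem.Str.join "" ["def ", fn, "("]) &&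
    !(PySem.Str.isIn "def test_" line)
-- line.strip() and not line.startswith(' ') and not line.startswith('\t')
def pvStops (line : String) : Bool :=
  (PySem.Str.len (PySem.Str.strip line) != 0) &&
    !(PySem.Str.startswith line " ") && !(PySem.Str.startswith line "\t")

-- ===== PORT A =====
def remove_function_redefinition_py (test_code : String) (function_name : String) : String :=
  let lines := (PySem.Str.split? test_code "\n").getD []
  let st := lines.foldl (fun (st : List String × Bool) line =>
    if pvIsDef function_name line then (st.1, true)
    else if st.2 then
      (if pvStops line then (st.1 ++ [line], false) else (st.1, true))
    else (st.1 ++ [line], false)) ([], false)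
  PySem.Str.join "\n" st.1

-- ===== PORT B =====
-- inner while loop of B: advance past blank / indented lines, keep the stopping line
def pvDropBlock : List String → List String
  | [] => []
  | l :: r => if !pvStops l then pvDropBlock r else l :: r

theorem pvDropBlock_length_le (ls : List String) : (pvDropBlock ls).length ≤ ls.length := by
  induction ls with
  | nil => simp [pvDropBlock]
  | cons l r ih => simp only [pvDropBlock]; split <;> simp; omega

-- outer index loop of B
def pvScan (fn : String) : List String → List String
  | [] => []
  | line :: rest =>
    if pvIsDef fn line then pvScan fn (pvDropBlock rest)
    else line :: pvScan fn rest
termination_by ls => ls.length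
decreasing_by
  · have := pvDropBlock_length_le rest; simp; omega
  · simp

def remove_function_redefinition_py_alt (test_code : String) (function_name : String) : String :=
  let lines := (PySem.Str.split? test_code "\n").getD []
  PySem.Str.join "\n" (pvScan function_name lines)

-- ===== PRECONDITION & SPEC =====
def Spec_remove_function_redefinition_py (test_code : String) (function_name : String) (out : String) : Prop := out = remove_function_redefinition_py_alt test_code function_name
instance (test_code : String) (function_name : String) (out : String) : Decidable (Spec_remove_function_redefinition_py test_code function_name out) := by unfold Spec_remove_function_redefinition_py; infer_instance

-- ===== CLAIM (what is proved, stated in full; the proofs are below) =====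
def Claim_equal_remove_function_redefinition_py : Prop := ∀ (test_code : String) (function_name : String), Dom_remove_function_redefinition_py test_code function_name → Spec_remove_function_redefinition_py test_code function_name (remove_function_redefinition_py test_code function_name)

-- ===== LEMMAS AND PROOFS =====

-- recursive characterisation of A's foldl state machine (proof helper)
def pvGo (fn : String) : List String → Bool → List String
  | [], _ => []
  | l :: r, skip =>
    if pvIsDef fn l then pvGo fn r true
    else if skip then
      (if pvStops l then l :: pvGo fn r false else pvGo fn r true)
    else l :: pvGo fn r false

theorem pvFoldl_eq_pvGo (fn : String) (lines : List String) :
    ∀ (acc : List String) (skip : Bool),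
    (lines.foldl (fun (st : List String × Bool) line =>
      if pvIsDef fn line then (st.1, true)
      else if st.2 then
        (if pvStops line then (st.1 ++ [line], false) else (st.1, true))
      else (st.1 ++ [line], false)) (acc, skip)).1 = acc ++ pvGo fn lines skip := by
  induction lines with
  | nil => intro acc skip; simp [pvGo]
  | cons l r ih =>
    intro acc skip
    simp only [List.foldl_cons, pvGo]
    by_cases h1 : pvIsDef fn l
    · simp [h1, ih]
    · by_cases h2 : skip
      · by_cases h3 : pvStops l <;> simp [h1, h2, h3, ih]
      · simp [h1, h2, ih]

theorem pvGo_eq_pvScan (fn : String) (lines : List String) :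
    ∀ skip : Bool, pvGo fn lines skip = pvScan fn (if skip then pvDropBlock lines else lines) := by
  induction lines with
  | nil => intro skip; cases skip <;> simp [pvGo, pvScan, pvDropBlock]
  | cons l r ih =>
    intro skip
    cases skip with
    | false =>
      simp only [pvGo, if_neg Bool.false_ne_true]
      rw [pvScan.eq_def]
      by_cases h1 : pvIsDef fn l
      · simpa [h1] using ih true
      · simp [h1, ih false]
    | true =>
      simp only [pvGo, ite_true, pvDropBlock]
      by_cases h3 : pvStops l
      · simp only [h3, Bool.not_true, ite_true]
        rw [pvScan.eq_def]
        by_cases h1 : pvIsDef fn l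
        · simpa [h1] using ih true
        · simp [h1, ih false]
      · simp only [h3, Bool.not_false, ite_true]
        by_cases h1 : pvIsDef fn l
        · simpa [h1] using ih true
        · simpa [h1] using ih true

-- ===== VERDICT (by name: the statement is the Claim_ definition above) =====
theorem remove_function_redefinition_py_spec : Claim_equal_remove_function_redefinition_py := by
  intro test_code function_name _
  unfold Spec_remove_function_redefinition_py
  unfold remove_function_redefinition_py remove_function_redefinition_py_alt
  simp only [pvFoldl_eq_pvGo, pvGo_eq_pvScan, List.nil_append, ite_false, Bool.false_eq_true]
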